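-- pv_equiv track=rewrite | github.com/Tejas07PSK/lb_dsa_cracker | Binary Trees/Check if 2 trees are mirror or not/solution.py | checkMirrorTree
-- ===== SOURCE A (Python) =====
-- from collections import deque
--
-- def checkMirrorTree (n, e, A, B):
--     node_children_map = {}
--     for i in range(0, (2 * e), 2):
--         if (A[i] not in node_children_map): node_children_map[A[i]] = deque()
--         node_children_map[A[i]].append(A[i + 1])
--     for j in range(0, (2 * e), 2):
--         if ((B[j] not in node_children_map) or (not node_children_map[B[j]]) or (node_children_map[B[j]].pop() != B[j + 1])): return 0
--     return 1
-- ===== SOURCE B (Python) =====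
-- def _child_map(X, e):
--     m = {}
--     for k in range(e):
--         m.setdefault(X[2 * k], []).append(X[2 * k + 1])
--     return m
--
-- def checkMirrorTree(n, e, A, B):
--     a_map = _child_map(A, e)
--     b_map = _child_map(B, e)
--     for parent, kids in b_map.items():
--         if parent not in a_map or a_map[parent][::-1] != kids:
--             return 0
--     return 1
-- ===== Notes on version B (the rewrite author's own statement) =====
-- stated objective: simpler
-- what changed: A validates B's edges by streaming LIFO pops from per-parent deques; B materializes both adjacency maps and then compares, per parent of B, the reversed A-children list against the B-children list.
-- outside the precondition, e.g. on checkMirrorTree(2, 2, [1, 2, 1, 3], [1, 9]): A returns 0, B raises IndexError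
import Mathlib
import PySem

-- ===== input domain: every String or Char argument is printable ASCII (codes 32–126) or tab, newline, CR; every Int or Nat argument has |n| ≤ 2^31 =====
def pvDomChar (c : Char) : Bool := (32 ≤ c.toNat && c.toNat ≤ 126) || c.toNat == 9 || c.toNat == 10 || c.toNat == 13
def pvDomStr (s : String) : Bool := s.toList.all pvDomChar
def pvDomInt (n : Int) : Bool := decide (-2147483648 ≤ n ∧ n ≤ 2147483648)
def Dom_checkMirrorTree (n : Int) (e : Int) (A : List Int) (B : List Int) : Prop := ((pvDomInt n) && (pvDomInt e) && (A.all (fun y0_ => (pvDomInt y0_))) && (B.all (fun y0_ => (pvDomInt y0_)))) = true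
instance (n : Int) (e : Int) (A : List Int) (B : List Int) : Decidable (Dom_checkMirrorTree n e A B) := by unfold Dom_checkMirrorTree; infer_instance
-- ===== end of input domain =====

-- B replaces A's streaming deque-pop validation by building both adjacency maps and then
-- comparing, for each parent of B, the reversed A-children list with the B-children list
-- (objective: simpler).

-- ===== PORT A =====
-- first loop: for i in range(0, 2*e, 2): if A[i] not in map: map[A[i]] = deque(); map[A[i]].append(A[i+1])
-- (indexing via pyGet?; the `.getD 0` default is never reached inside Pre_, where every index is in range)
def pvBuildLoopA (A : List Int) : List Int → PySem.Dict Int (List Int) → PySem.Dict Int (List Int)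
  | [], m => m
  | i :: rest, m =>
    let p := (PySem.List.pyGet? A i).getD 0
    let m1 := if m.contains p then m else m.insert p []
    let m2 := m1.modify p [] (fun l => l ++ [(PySem.List.pyGet? A (i + 1)).getD 0])
    pvBuildLoopA A rest m2

-- second loop: for j in range(0, 2*e, 2): if B[j] not in map or not map[B[j]] or map[B[j]].pop() != B[j+1]: return 0
def pvPopLoopA (B : List Int) : List Int → PySem.Dict Int (List Int) → Int
  | [], _ => 1
  | j :: rest, m =>
    let p := (PySem.List.pyGet? B j).getD 0
    match m.get? p with
    | none => 0
    | some l =>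
      if l = [] then 0
      else
        let popped := l.getLast?.getD 0        -- deque.pop(): last element …
        let m' := m.insert p l.dropLast        -- … removed in place
        if popped ≠ (PySem.List.pyGet? B (j + 1)).getD 0 then 0 else pvPopLoopA B rest m'

def checkMirrorTree (n : Int) (e : Int) (A : List Int) (B : List Int) : Int :=
  let m := pvBuildLoopA A (PySem.List.pyRange 0 (2 * e) 2) PySem.Dict.empty
  pvPopLoopA B (PySem.List.pyRange 0 (2 * e) 2) m

-- ===== PORT B =====
-- _child_map: for k in range(e): m.setdefault(X[2*k], []).append(X[2*k+1])
def pvChildMap (X : List Int) (e : Int) : PySem.Dict Int (List Int) :=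
  (PySem.List.pyRange 0 e 1).foldl
    (fun m k =>
      let p := (PySem.List.pyGet? X (2 * k)).getD 0
      (m.setdefault p []).modify p [] (fun l => l ++ [(PySem.List.pyGet? X (2 * k + 1)).getD 0]))
    PySem.Dict.empty

-- for parent, kids in b_map.items(): if parent not in a_map or a_map[parent][::-1] != kids: return 0
def pvCompareLoop (amap : PySem.Dict Int (List Int)) : List (Int × List Int) → Int
  | [] => 1
  | (p, kids) :: rest =>
    match amap.get? p with
    | none => 0
    | some l =>
      if (PySem.List.slice? l none none (-1)).getD [] ≠ kids then 0
      else pvCompareLoop amap rest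

def checkMirrorTree_alt (n : Int) (e : Int) (A : List Int) (B : List Int) : Int :=
  let amap := pvChildMap A e
  let bmap := pvChildMap B e
  pvCompareLoop amap bmap.items

-- ===== PRECONDITION & SPEC =====
-- Pre_ excludes inputs where A or B is shorter than the 2*e flat edge slots: there A raises
-- IndexError, or (when an early mismatch in the second loop hits before a missing B index)
-- A still returns 0 while B's map-building itself raises IndexError.
def Pre_checkMirrorTree (n : Int) (e : Int) (A : List Int) (B : List Int) : Prop :=
  2 * e ≤ (A.length : Int) ∧ 2 * e ≤ (B.length : Int)
instance (n : Int) (e : Int) (A : List Int) (B : List Int) : Decidable (Pre_checkMirrorTree n e A B) := by unfold Pre_checkMirrorTree; infer_instance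

def pvWitness_checkMirrorTree : Int × Int × List Int × List Int := (3, 2, [1, 2, 1, 3], [1, 3, 1, 2])

def Spec_checkMirrorTree (n : Int) (e : Int) (A : List Int) (B : List Int) (out : Int) : Prop := out = checkMirrorTree_alt n e A B
instance (n : Int) (e : Int) (A : List Int) (B : List Int) (out : Int) : Decidable (Spec_checkMirrorTree n e A B out) := by unfold Spec_checkMirrorTree; infer_instance

-- ===== CLAIM (what is proved, stated in full; the proofs are below) =====
def Claim_equal_checkMirrorTree : Prop := ∀ (n : Int) (e : Int) (A : List Int) (B : List Int), Dom_checkMirrorTree n e A B → Pre_checkMirrorTree n e A B → Spec_checkMirrorTree n e A B (checkMirrorTree n e A B)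

-- ===== LEMMAS AND PROOFS =====

-- the (parent, child) edge pairs both programs read off the flat list
def pvEdges (X : List Int) (k : Nat) : List (Int × Int) :=
  (List.range k).map (fun j => (X.getD (2 * j) 0, X.getD (2 * j + 1) 0))

-- the children of parent p, in edge order
def pvGroup (bs : List (Int × Int)) (p : Int) : List Int :=
  (bs.filter (fun q => q.1 == p)).map (fun q => q.2)

-- canonical adjacency-map build both builds reduce to
def pvF (bs : List (Int × Int)) : PySem.Dict Int (List Int) :=
  bs.foldl (fun m q => m.modify q.1 [] (fun l => l ++ [q.2])) PySem.Dict.empty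

-- A's pop loop on explicit edge pairs
def pvStream : List (Int × Int) → PySem.Dict Int (List Int) → Int
  | [], _ => 1
  | (p, c) :: rest, m =>
    match m.get? p with
    | none => 0
    | some l =>
      if l = [] then 0
      else if l.getLast?.getD 0 ≠ c then 0 else pvStream rest (m.insert p l.dropLast)

theorem pvRange2_eq (e : Int) :
    PySem.List.pyRange 0 (2 * e) 2 = (List.range e.toNat).map (fun j => ((2 * j : Nat) : Int)) := by
  rw [PySem.List.pyRange_of_pos 0 (2 * e) (by norm_num)]
  rcases (by omega : e ≤ 0 ∨ 0 < e) with h | h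
  · rw [if_neg (by omega)]
    simp [Int.toNat_of_nonpos (by omega : e ≤ 0)]
  · rw [if_pos (by omega)]
    have : ((2 * e - 0 + 2 - 1) / 2) = e := by omega
    rw [this]
    apply List.map_congr_left
    intro j _; push_cast; ring

theorem pvRange1_eq (e : Int) :
    PySem.List.pyRange 0 e 1 = (List.range e.toNat).map (fun j => ((j : Nat) : Int)) := by
  rw [PySem.List.pyRange_one]
  simp

theorem pvStep_eq (m : PySem.Dict Int (List Int)) (p c : Int) :
    (if m.contains p then m else m.insert p []).modify p [] (fun l => l ++ [c])
      = m.modify p [] (fun l => l ++ [c]) := by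
  by_cases h : m.contains p
  · rw [if_pos h]
  · rw [if_neg h]
    show ((m.insert p []).insert p _) = m.insert p _
    rw [PySem.Dict.getD_insert_self, PySem.Dict.insert_insert_self,
      PySem.Dict.getD_of_not_contains m [] (by simpa using h)]

theorem pvStepSetdefault_eq (m : PySem.Dict Int (List Int)) (p c : Int) :
    (m.setdefault p []).modify p [] (fun l => l ++ [c]) = m.modify p [] (fun l => l ++ [c]) := by
  by_cases h : m.contains p
  · rw [PySem.Dict.setdefault_of_contains m [] h]
  · rw [PySem.Dict.setdefault_of_not_contains m [] (by simpa using h)]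
    show ((m.insert p []).insert p _) = m.insert p _
    rw [PySem.Dict.getD_insert_self, PySem.Dict.insert_insert_self,
      PySem.Dict.getD_of_not_contains m [] (by simpa using h)]

theorem pvIdx (X : List Int) (j : Nat) :
    (PySem.List.pyGet? X ((2 * j : Nat) : Int)).getD 0 = X.getD (2 * j) 0 ∧
    (PySem.List.pyGet? X (((2 * j : Nat) : Int) + 1)).getD 0 = X.getD (2 * j + 1) 0 := by
  constructor
  · rw [PySem.List.pyGet?_natCast]
    simp [List.getD_eq_getElem?_getD]
  · have : (((2 * j : Nat) : Int) + 1) = (((2 * j + 1 : Nat)) : Int) := by push_cast; ring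
    rw [this, PySem.List.pyGet?_natCast]
    simp [List.getD_eq_getElem?_getD]

theorem pvBuildLoopA_gen (A : List Int) (js : List Nat) :
    ∀ m, pvBuildLoopA A (js.map (fun j => ((2 * j : Nat) : Int))) m
      = (js.map (fun j => (A.getD (2 * j) 0, A.getD (2 * j + 1) 0))).foldl
          (fun m q => m.modify q.1 [] (fun l => l ++ [q.2])) m := by
  induction js with
  | nil => intro m; rfl
  | cons j rest ih =>
    intro m
    rw [List.map_cons, List.map_cons, pvBuildLoopA, List.foldl_cons]
    simp only [(pvIdx A j).1, (pvIdx A j).2, pvStep_eq]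
    exact ih _

theorem pvBuildLoopA_eq (e : Int) (A : List Int) :
    pvBuildLoopA A (PySem.List.pyRange 0 (2 * e) 2) PySem.Dict.empty = pvF (pvEdges A e.toNat) := by
  rw [pvRange2_eq, pvBuildLoopA_gen]
  rfl

theorem pvChildMap_eq (X : List Int) (e : Int) :
    pvChildMap X e = pvF (pvEdges X e.toNat) := by
  unfold pvChildMap pvF pvEdges
  rw [pvRange1_eq, List.foldl_map, List.foldl_map]
  apply PySem.List.foldl_congr_mem
  intro m k _
  have h2 : ((2 : Int) * (k : Int)) = ((2 * k : Nat) : Int) := by push_cast; ring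
  simp only [h2, (pvIdx X k).1, (pvIdx X k).2, pvStepSetdefault_eq]

theorem pvPopLoopA_gen (B : List Int) (js : List Nat) :
    ∀ m, pvPopLoopA B (js.map (fun j => ((2 * j : Nat) : Int))) m
      = pvStream (js.map (fun j => (B.getD (2 * j) 0, B.getD (2 * j + 1) 0))) m := by
  induction js with
  | nil => intro m; rfl
  | cons j rest ih =>
    intro m
    rw [List.map_cons, List.map_cons, pvPopLoopA, pvStream]
    simp only [(pvIdx B j).1, (pvIdx B j).2]
    cases m.get? (B.getD (2 * j) 0) with
    | none => rfl
    | some l =>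
      dsimp only
      by_cases hl : l = []
      · simp [hl]
      · rw [if_neg hl, if_neg hl]
        by_cases hc : l.getLast?.getD 0 = B.getD (2 * j + 1) 0
        · rw [if_neg (not_not_intro hc), if_neg (not_not_intro hc)]
          exact ih _
        · rw [if_pos hc, if_pos hc]

theorem pvPopLoopA_eq (B : List Int) (e : Int) (m : PySem.Dict Int (List Int)) :
    pvPopLoopA B (PySem.List.pyRange 0 (2 * e) 2) m = pvStream (pvEdges B e.toNat) m := by
  rw [pvRange2_eq, pvPopLoopA_gen]
  rfl

theorem pvF_getD (bs : List (Int × Int)) (p : Int) :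
    (pvF bs).getD p [] = pvGroup bs p := by
  unfold pvF pvGroup
  rw [PySem.Dict.getD_foldl_modify_append]
  simp

theorem pvReverse_ne_nil (l : List Int) (h : l ≠ []) :
    l.reverse = l.getLast?.getD 0 :: l.dropLast.reverse := by
  conv_lhs => rw [← List.dropLast_append_getLast h]
  rw [List.reverse_append, List.getLast?_eq_some_getLast h]
  rfl

theorem pvGroup_cons (p₀ c₀ p : Int) (rest : List (Int × Int)) :
    pvGroup ((p₀, c₀) :: rest) p = if p₀ = p then c₀ :: pvGroup rest p else pvGroup rest p := by
  by_cases h : p₀ = p <;> simp [pvGroup, h]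

-- A's pop loop succeeds iff every parent's B-children are a prefix of its reversed A-children
theorem pvStream_eq_one (bs : List (Int × Int)) :
    ∀ m, (pvStream bs m = 1 ↔ ∀ p, pvGroup bs p <+: (m.getD p []).reverse) := by
  induction bs with
  | nil => intro m; simp [pvStream, pvGroup]
  | cons q rest ih =>
    obtain ⟨p₀, c₀⟩ := q
    intro m
    rw [pvStream]
    cases hm : m.get? p₀ with
    | none =>
      dsimp only
      have hg : m.getD p₀ [] = [] := PySem.Dict.getD_of_get?_eq_none m [] hm
      constructor
      · intro h; exact absurd h (by decide)
      · intro h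
        have := h p₀
        rw [pvGroup_cons, if_pos rfl, hg] at this
        simp at this
    | some l =>
      dsimp only
      have hg : m.getD p₀ [] = l := PySem.Dict.getD_of_get?_eq_some m [] hm
      by_cases hl : l = []
      · rw [if_pos hl]
        constructor
        · intro h; exact absurd h (by decide)
        · intro h
          have := h p₀
          rw [pvGroup_cons, if_pos rfl, hg, hl] at this
          simp at this
      · rw [if_neg hl]
        by_cases hc : l.getLast?.getD 0 = c₀
        · rw [if_neg (not_not_intro hc), ih]
          constructor
          · intro h p
            rw [pvGroup_cons]
            by_cases hp : p₀ = p
            · subst hp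
              rw [if_pos rfl, hg, pvReverse_ne_nil l hl, hc, List.cons_prefix_cons]
              refine ⟨rfl, ?_⟩
              have := h p₀
              rwa [PySem.Dict.getD_insert_self] at this
            · rw [if_neg hp]
              have := h p
              rwa [PySem.Dict.getD_insert_of_ne _ _ _ (Ne.symm hp)] at this
          · intro h p
            by_cases hp : p₀ = p
            · subst hp
              rw [PySem.Dict.getD_insert_self]
              have := h p₀
              rw [pvGroup_cons, if_pos rfl, hg, pvReverse_ne_nil l hl, hc,
                List.cons_prefix_cons] at this
              exact this.2
            · rw [PySem.Dict.getD_insert_of_ne _ _ _ (Ne.symm hp)]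
              have := h p
              rwa [pvGroup_cons, if_neg hp] at this
        · rw [if_pos hc]
          constructor
          · intro h; exact absurd h (by decide)
          · intro h
            have := h p₀
            rw [pvGroup_cons, if_pos rfl, hg, pvReverse_ne_nil l hl,
              List.cons_prefix_cons] at this
            exact (hc this.1.symm).elim

-- B's comparison loop succeeds iff every listed parent's reversed A-children equal its B-children
theorem pvCompareLoop_eq_one (am : PySem.Dict Int (List Int)) (items : List (Int × List Int))
    (hne : ∀ q ∈ items, q.2 ≠ []) :
    pvCompareLoop am items = 1 ↔ ∀ q ∈ items, (am.getD q.1 []).reverse = q.2 := by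
  induction items with
  | nil => simp [pvCompareLoop]
  | cons q rest ih =>
    obtain ⟨p, kids⟩ := q
    rw [pvCompareLoop]
    cases hm : am.get? p with
    | none =>
      dsimp only
      have hg : am.getD p [] = [] := PySem.Dict.getD_of_get?_eq_none am [] hm
      constructor
      · intro h; exact absurd h (by decide)
      · intro h
        have := h (p, kids) (by simp)
        rw [hg] at this
        exact absurd this.symm (hne (p, kids) (by simp))
    | some l =>
      dsimp only
      have hg : am.getD p [] = l := PySem.Dict.getD_of_get?_eq_some am [] hm
      rw [PySem.List.slice?_none_none_neg_one]
      by_cases hc : l.reverse = kids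
      · rw [if_neg (by simpa using hc), ih (fun q hq => hne q (by simp [hq]))]
        constructor
        · intro h q hq
          rcases List.mem_cons.mp hq with h1 | h2
          · subst h1; rw [hg]; exact hc
          · exact h q h2
        · intro h q hq; exact h q (by simp [hq])
      · rw [if_pos (by simpa using hc)]
        constructor
        · intro h; exact absurd h (by decide)
        · intro h
          have := h (p, kids) (by simp)
          rw [hg] at this
          exact (hc this).elim

theorem pvF_keys_nodup (bs : List (Int × Int)) : (pvF bs).keys.Nodup := by
  unfold pvF
  exact PySem.Dict.nodup_keys_foldl_modify_key bs Prod.fst [] (fun _ q => fun l => l ++ [q.2])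
    PySem.Dict.empty (by simp [PySem.Dict.keys_empty])

theorem pvF_mem_keys (bs : List (Int × Int)) (p : Int) :
    p ∈ (pvF bs).keys ↔ p ∈ bs.map Prod.fst := by
  unfold pvF
  rw [PySem.Dict.keys_foldl_modify_key bs Prod.fst [] (fun _ q => fun l => l ++ [q.2])]
  rw [PySem.Dict.keys_empty]
  show p ∈ PySem.Set.update PySem.Set.empty _ ↔ _
  rw [PySem.Set.update_empty]
  exact PySem.Set.mem_ofList _ _

theorem pvF_items (bs : List (Int × Int)) (q : Int × List Int) (hq : q ∈ (pvF bs).items) :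
    q.1 ∈ bs.map Prod.fst ∧ q.2 = pvGroup bs q.1 := by
  obtain ⟨p, v⟩ := q
  have h1 : (pvF bs).get? p = some v :=
    PySem.Dict.get?_of_mem_items _ hq (pvF_keys_nodup bs)
  have h2 : (pvF bs).getD p [] = v := PySem.Dict.getD_of_get?_eq_some _ [] h1
  have hk : p ∈ (pvF bs).keys := PySem.Dict.mem_keys_of_mem_items _ hq
  exact ⟨(pvF_mem_keys bs p).mp hk, by rw [← h2, pvF_getD]⟩

theorem pvF_items_of_mem (bs : List (Int × Int)) (p : Int) (hp : p ∈ bs.map Prod.fst) :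
    (p, pvGroup bs p) ∈ (pvF bs).items := by
  have hk : p ∈ (pvF bs).keys := (pvF_mem_keys bs p).mpr hp
  have hc : (pvF bs).contains p = true := (PySem.Dict.contains_iff_mem_keys _ _).mpr hk
  have hs : ((pvF bs).get? p).isSome := by rw [← PySem.Dict.contains_eq_isSome_get?]; exact hc
  obtain ⟨v, hv⟩ := Option.isSome_iff_exists.mp hs
  have h2 : (pvF bs).getD p [] = v := PySem.Dict.getD_of_get?_eq_some _ [] hv
  rw [← pvF_getD bs p, h2]
  exact PySem.Dict.mem_items_of_get?_eq_some _ hv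

theorem pvGroup_length (bs : List (Int × Int)) (p : Int) :
    (pvGroup bs p).length = (bs.map Prod.fst).count p := by
  simp [pvGroup, List.count_eq_countP, List.countP_map]
  rw [← List.countP_eq_length_filter]
  congr 1

theorem pvGroup_ne_nil (bs : List (Int × Int)) (p : Int) (h : p ∈ bs.map Prod.fst) :
    pvGroup bs p ≠ [] := by
  intro hnil
  have := pvGroup_length bs p
  rw [hnil] at this
  have h2 := List.count_pos_iff.mpr h
  rw [← this] at h2
  simp at h2

theorem pvGroup_eq_nil (bs : List (Int × Int)) (p : Int) (h : p ∉ bs.map Prod.fst) :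
    pvGroup bs p = [] := by
  simp only [pvGroup, List.map_eq_nil_iff, List.filter_eq_nil_iff]
  intro q hq hbeq
  exact h (List.mem_map.mpr ⟨q, hq, by simpa using hbeq⟩)

-- the counting finale: equal edge totals turn per-parent prefixes into per-parent equality
theorem pvPrefix_to_eq (as bs : List (Int × Int)) (hlen : as.length = bs.length)
    (H : ∀ p, pvGroup bs p <+: (pvGroup as p).reverse) :
    ∀ p ∈ bs.map Prod.fst, (pvGroup as p).reverse = pvGroup bs p := by
  classical
  set la := as.map Prod.fst with hla
  set lb := bs.map Prod.fst with hlb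
  have hcount : ∀ p, lb.count p ≤ la.count p := by
    intro p
    have := (H p).length_le
    rwa [List.length_reverse, pvGroup_length, pvGroup_length] at this
  set S : Finset Int := la.toFinset ∪ lb.toFinset with hS
  have hsuma : ∑ p ∈ S, la.count p = la.length := by
    rw [← List.sum_toFinset_count_eq_length la]
    exact (Finset.sum_subset (Finset.subset_union_left) (by
      intro x _ hx
      simp [List.count_eq_zero_of_not_mem (by simpa using hx)])).symm
  have hsumb : ∑ p ∈ S, lb.count p = lb.length := by
    rw [← List.sum_toFinset_count_eq_length lb]
    exact (Finset.sum_subset (Finset.subset_union_right) (by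
      intro x _ hx
      simp [List.count_eq_zero_of_not_mem (by simpa using hx)])).symm
  have hlen' : la.length = lb.length := by simp [hla, hlb, hlen]
  have heq : ∀ p ∈ S, lb.count p = la.count p := by
    apply (Finset.sum_eq_sum_iff_of_le (fun i _ => hcount i)).mp
    rw [hsuma, hsumb, hlen']
  intro p hp
  have hpS : p ∈ S := Finset.mem_union_right _ (by simpa using hp)
  have : (pvGroup bs p).length = ((pvGroup as p).reverse).length := by
    rw [List.length_reverse, pvGroup_length, pvGroup_length]
    exact heq p hpS
  exact ((H p).eq_of_length this).symm

theorem pvStream_zero_or_one (bs : List (Int × Int)) :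
    ∀ m, pvStream bs m = 0 ∨ pvStream bs m = 1 := by
  induction bs with
  | nil => intro m; right; rfl
  | cons q rest ih =>
    obtain ⟨p, c⟩ := q
    intro m
    rw [pvStream]
    cases m.get? p with
    | none => left; rfl
    | some l =>
      dsimp only
      split_ifs with h1 h2
      · left; rfl
      · left; rfl
      · exact ih _

theorem pvCompareLoop_zero_or_one (am : PySem.Dict Int (List Int)) (items : List (Int × List Int)) :
    pvCompareLoop am items = 0 ∨ pvCompareLoop am items = 1 := by
  induction items with
  | nil => right; rfl
  | cons q rest ih =>
    obtain ⟨p, kids⟩ := q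
    rw [pvCompareLoop]
    cases am.get? p with
    | none => left; rfl
    | some l =>
      dsimp only
      split_ifs with h1
      · left; rfl
      · exact ih

theorem pvMain (e : Int) (A B : List Int) :
    pvStream (pvEdges B e.toNat) (pvF (pvEdges A e.toNat))
      = pvCompareLoop (pvF (pvEdges A e.toNat)) ((pvF (pvEdges B e.toNat)).items) := by
  have hlen : (pvEdges A e.toNat).length = (pvEdges B e.toNat).length := by simp [pvEdges]
  have hne : ∀ q ∈ (pvF (pvEdges B e.toNat)).items, q.2 ≠ [] := by
    intro q hq
    obtain ⟨h1, h2⟩ := pvF_items _ q hq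
    rw [h2]
    exact pvGroup_ne_nil _ _ h1
  have hiff : pvStream (pvEdges B e.toNat) (pvF (pvEdges A e.toNat)) = 1 ↔
      pvCompareLoop (pvF (pvEdges A e.toNat)) ((pvF (pvEdges B e.toNat)).items) = 1 := by
    rw [pvStream_eq_one, pvCompareLoop_eq_one _ _ hne]
    constructor
    · intro H q hq
      obtain ⟨h1, h2⟩ := pvF_items _ q hq
      rw [pvF_getD, h2]
      exact pvPrefix_to_eq _ _ hlen (by intro p; have h := H p; rwa [pvF_getD] at h) q.1 h1
    · intro K p
      rw [pvF_getD]
      by_cases hp : p ∈ (pvEdges B e.toNat).map Prod.fst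
      · have := K (p, pvGroup (pvEdges B e.toNat) p) (pvF_items_of_mem _ p hp)
        rw [pvF_getD] at this
        rw [this]
      · rw [pvGroup_eq_nil _ p hp]
        exact List.nil_prefix
  rcases pvStream_zero_or_one (pvEdges B e.toNat) (pvF (pvEdges A e.toNat)) with h1 | h1 <;>
    rcases pvCompareLoop_zero_or_one (pvF (pvEdges A e.toNat)) ((pvF (pvEdges B e.toNat)).items) with h2 | h2
  · rw [h1, h2]
  · have := hiff.mpr h2; rw [h1] at this; exact absurd this (by decide)
  · have := hiff.mp h1; rw [h2] at this; exact absurd this (by decide)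
  · rw [h1, h2]

-- ===== VERDICT (by name: the statement is the Claim_ definition above) =====
theorem checkMirrorTree_spec : Claim_equal_checkMirrorTree := by
  intro n e A B _hd _hpre
  unfold Spec_checkMirrorTree checkMirrorTree checkMirrorTree_alt
  rw [pvBuildLoopA_eq e A, pvChildMap_eq A e, pvChildMap_eq B e, pvPopLoopA_eq B e, pvMain e A B]
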